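-- pv_equiv track=rewrite | github.com/Venkataramana-Baratam/GFG-SOLUTIONS | Difficulty: Medium/Count elements less than or equal to k in a sorted rotated array/count-elements-less-than-or-equal-to-k-in-a-sorted-rotated-array.py | countLessEqual
-- ===== SOURCE A (Python) =====
-- from bisect import bisect_left,bisect_right
--
-- def countLessEqual(arr, x):
--     #code here
--
--     pivot = 0
--     for i in range(len(arr)-1):
--
--         if arr[i]>arr[i+1]:
--             pivot = i
--             break
--     arr1 = arr[:pivot+1]
--     arr2 = arr[pivot+1:]
--     n1 = len(arr1)
--     n2 = len(arr2)
--     ub1 = bisect_right(arr1,x)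
--     ub2 = bisect_right(arr2,x)
--
--
--     return ub1+ub2
-- ===== SOURCE B (Python) =====
-- def countLessEqual(arr, x):
--     return sum(1 for v in arr if v <= x)
-- ===== Notes on version B (the rewrite author's own statement) =====
-- stated objective: simpler
-- what changed: B drops the pivot scan, the slicing and the two binary searches entirely and counts the elements <= x in one direct pass; Pre_ restricts to the task's stated domain (sorted rotated arrays: at most one adjacent descent), outside which A's bisect_right over unsorted halves returns an accidental value no caller of this function would rely on.
-- outside the precondition, e.g. on countLessEqual([1, 5, 0, 5, 0], 3): A returns 2, B returns 3
import Mathlib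
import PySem

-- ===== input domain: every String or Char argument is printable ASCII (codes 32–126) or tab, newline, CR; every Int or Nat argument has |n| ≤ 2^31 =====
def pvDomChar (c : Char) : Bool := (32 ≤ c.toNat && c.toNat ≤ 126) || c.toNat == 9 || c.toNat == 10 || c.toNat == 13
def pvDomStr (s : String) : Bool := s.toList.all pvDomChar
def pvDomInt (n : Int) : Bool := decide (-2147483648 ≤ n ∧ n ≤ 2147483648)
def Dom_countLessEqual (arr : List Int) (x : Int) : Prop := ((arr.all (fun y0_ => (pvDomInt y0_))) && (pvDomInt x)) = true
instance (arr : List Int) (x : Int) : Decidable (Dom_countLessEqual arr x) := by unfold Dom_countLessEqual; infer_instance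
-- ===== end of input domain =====

-- B counts the elements ≤ x in one direct pass instead of A's pivot scan + slicing + two
-- binary searches; equal on the task's stated domain (sorted rotated arrays), see Pre_ below.

-- ===== PORT A =====
-- the 'for i in range(len(arr)-1): if arr[i]>arr[i+1]: pivot=i; break' loop, as the obvious
-- structural scan over adjacent pairs carrying the running index i (0 when no descent is found)
def findPivotA : List Int → Int → Int
  | a :: b :: rest, i => if a > b then i else findPivotA (b :: rest) (i + 1)
  | _, _ => 0

def countLessEqual (arr : List Int) (x : Int) : Int :=
  let pivot := findPivotA arr 0
  let arr1 := PySem.List.slice arr none (some (pivot + 1))   -- arr[:pivot+1]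
  let arr2 := PySem.List.slice arr (some (pivot + 1)) none   -- arr[pivot+1:]
  let ub1 := ((PySem.List.bisectRight arr1 x : Nat) : Int)   -- bisect_right(arr1, x)
  let ub2 := ((PySem.List.bisectRight arr2 x : Nat) : Int)   -- bisect_right(arr2, x)
  ub1 + ub2

-- ===== PORT B =====
def countLessEqual_alt (arr : List Int) (x : Int) : Int :=
  arr.foldl (fun acc v => if v ≤ x then acc + 1 else acc) 0

-- ===== PRECONDITION & SPEC =====
-- Pre_ restricts to the function's stated domain — sorted rotated arrays, i.e. at most one
-- adjacent descent; on other arrays A still returns, but its bisect_right over unsorted halves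
-- yields an accidental value no caller of this function would rely on, which B does not match.
def Pre_countLessEqual (arr : List Int) (x : Int) : Prop :=
  (arr.zip arr.tail).countP (fun p => decide (p.2 < p.1)) ≤ 1
instance (arr : List Int) (x : Int) : Decidable (Pre_countLessEqual arr x) := by
  unfold Pre_countLessEqual; infer_instance

def pvWitness_countLessEqual : List Int × Int := ([4, 5, 1, 2, 3], 4)

def Spec_countLessEqual (arr : List Int) (x : Int) (out : Int) : Prop := out = countLessEqual_alt arr x
instance (arr : List Int) (x : Int) (out : Int) : Decidable (Spec_countLessEqual arr x out) := by unfold Spec_countLessEqual; infer_instance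

-- ===== CLAIM (what is proved, stated in full; the proofs are below) =====
def Claim_equal_countLessEqual : Prop := ∀ (arr : List Int) (x : Int), Dom_countLessEqual arr x → Pre_countLessEqual arr x → Spec_countLessEqual arr x (countLessEqual arr x)

-- ===== LEMMAS AND PROOFS =====

-- number of adjacent descents (the quantity Pre_ bounds)
def desc (l : List Int) : Nat := (l.zip l.tail).countP (fun p => decide (p.2 < p.1))

-- Nat-valued mirror of findPivotA, convenient for take/drop reasoning
def fp : List Int → Nat → Nat
  | a :: b :: rest, i => if a > b then i else fp (b :: rest) (i + 1)
  | _, _ => 0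

lemma findPivotA_eq : ∀ (l : List Int) (i : Nat), findPivotA l (i : Int) = (fp l i : Int) := by
  intro l
  induction l with
  | nil => intro i; rfl
  | cons a t ih =>
    intro i
    cases t with
    | nil => rfl
    | cons b t2 =>
      by_cases h : a > b
      · simp [findPivotA, fp, h]
      · have := ih (i + 1)
        simp [findPivotA, fp, h]
        push_cast at this ⊢
        simpa using this

lemma desc_cons2 (a b : Int) (t : List Int) :
    desc (a :: b :: t) = desc (b :: t) + (if b < a then 1 else 0) := by
  simp [desc, List.countP_cons]

lemma desc_zero_iff (l : List Int) : desc l = 0 ↔ l.Pairwise (· ≤ ·) := by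
  induction l with
  | nil => simp [desc]
  | cons a t ih =>
    cases t with
    | nil => simp [desc]
    | cons b t2 =>
      rw [desc_cons2, List.pairwise_cons]
      constructor
      · intro h
        have h1 : desc (b :: t2) = 0 := by omega
        have h2 : ¬ b < a := by by_contra hc; simp [hc] at h
        have hp := ih.1 h1
        refine ⟨?_, hp⟩
        intro y hy
        rcases List.mem_cons.1 hy with rfl | hy
        · omega
        · have hby : b ≤ y := (List.pairwise_cons.1 hp).1 y hy
          omega
      · rintro ⟨hall, hp⟩
        have h1 : desc (b :: t2) = 0 := ih.2 hp
        have h2 : ¬ b < a := by have := hall b (by simp); omega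
        simp [h1, h2]

lemma fp_shift : ∀ (l : List Int), desc l ≠ 0 → ∀ i : Nat, fp l i = i + fp l 0 := by
  intro l
  induction l with
  | nil => intro h; simp [desc] at h
  | cons a t ih =>
    cases t with
    | nil => intro h; simp [desc] at h
    | cons b t2 =>
      intro h i
      by_cases hba : a > b
      · simp [fp, hba]
      · rw [desc_cons2] at h
        have hd : desc (b :: t2) ≠ 0 := by
          have : ¬ b < a := by omega
          simp [this] at h; exact h
        simp only [fp, if_neg hba]
        rw [ih hd (i + 1), ih hd 1]
        omega

lemma halves_sorted : ∀ (l : List Int), desc l ≤ 1 →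
    (l.take (fp l 0 + 1)).Pairwise (· ≤ ·) ∧ (l.drop (fp l 0 + 1)).Pairwise (· ≤ ·) := by
  intro l
  induction l with
  | nil => intro _; simp
  | cons a t ih =>
    cases t with
    | nil => intro _; simp [fp]
    | cons b t2 =>
      intro h
      by_cases hba : a > b
      · have h0 : fp (a :: b :: t2) 0 = 0 := by simp [fp, hba]
        rw [desc_cons2, if_pos (by omega)] at h
        have hd : desc (b :: t2) = 0 := by omega
        have hp := (desc_zero_iff (b :: t2)).1 hd
        simp [h0, hp]
      · have h0 : fp (a :: b :: t2) 0 = fp (b :: t2) 1 := by simp [fp, hba]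
        rw [desc_cons2, if_neg (by omega)] at h
        by_cases hd : desc (b :: t2) = 0
        · -- whole list sorted: take/drop of a sorted list are sorted
          have hp : (a :: b :: t2).Pairwise (· ≤ ·) := by
            rw [← desc_zero_iff, desc_cons2]
            simp [hd]; omega
          exact ⟨hp.sublist (List.take_sublist _ _), hp.sublist (List.drop_sublist _ _)⟩
        · have hsh := fp_shift (b :: t2) hd 1
          rw [h0, hsh]
          obtain ⟨ht, hdr⟩ := ih h
          constructor
          · -- take (1 + fp0 + 1) (a :: b :: t2) = a :: take (fp0 + 1) (b :: t2)
            have : (a :: b :: t2).take (1 + fp (b :: t2) 0 + 1)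
                 = a :: (b :: t2).take (fp (b :: t2) 0 + 1) := by
              have : 1 + fp (b :: t2) 0 + 1 = (fp (b :: t2) 0 + 1) + 1 := by omega
              rw [this, List.take_succ_cons]
            rw [this]
            -- (b :: t2).take (fp0+1) = b :: t2.take fp0, sorted by ih; extend with a ≤ b
            rw [List.take_succ_cons] at ht ⊢
            rw [List.pairwise_cons]
            refine ⟨?_, ht⟩
            intro y hy
            rcases List.mem_cons.1 hy with rfl | hy
            · omega
            · have hb := (List.pairwise_cons.1 ht).1 y hy
              omega
          · have : (a :: b :: t2).drop (1 + fp (b :: t2) 0 + 1)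
                 = (b :: t2).drop (fp (b :: t2) 0 + 1) := by
              have : 1 + fp (b :: t2) 0 + 1 = (fp (b :: t2) 0 + 1) + 1 := by omega
              rw [this, List.drop_succ_cons]
            rw [this]; exact hdr

lemma countP_split (x : Int) : ∀ (l : List Int) (k : Nat), k ≤ l.length →
    (∀ j (hj : j < l.length), j < k → l[j] ≤ x) →
    (∀ j (hj : j < l.length), k ≤ j → x < l[j]) →
    l.countP (fun v => decide (v ≤ x)) = k := by
  intro l
  induction l with
  | nil => intro k hk _ _; simp at hk ⊢; omega
  | cons a t ih =>
    intro k hk h1 h2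
    cases k with
    | zero =>
      rw [List.countP_eq_zero]
      intro v hv
      rw [List.mem_iff_getElem] at hv
      obtain ⟨j, hj, rfl⟩ := hv
      have := h2 j hj (Nat.zero_le _)
      simpa using by omega
    | succ k' =>
      have ha : a ≤ x := h1 0 (by simp) (by omega)
      rw [List.countP_cons]
      have := ih k' (by simpa using hk)
        (fun j hj hjk => by simpa using h1 (j+1) (by simpa using hj) (by omega))
        (fun j hj hjk => by simpa using h2 (j+1) (by simpa using hj) (by omega))
      simp [ha, this]

lemma bisect_count (l : List Int) (x : Int) (hs : l.Pairwise (· ≤ ·)) :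
    PySem.List.bisectRight l x = l.countP (fun v => decide (v ≤ x)) := by
  obtain ⟨h1, h2, h3⟩ := PySem.List.bisectRight_spec l x hs
  exact (countP_split x l _ h1 h2 h3).symm

lemma foldl_count (x : Int) : ∀ (l : List Int) (acc : Int),
    l.foldl (fun acc v => if v ≤ x then acc + 1 else acc) acc
      = acc + (l.countP (fun v => decide (v ≤ x)) : Int) := by
  intro l
  induction l with
  | nil => intro acc; simp
  | cons a t ih =>
    intro acc
    by_cases h : a ≤ x <;> simp [h, ih] <;> push_cast <;> ring

-- ===== VERDICT (by name: the statement is the Claim_ definition above) =====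
theorem countLessEqual_spec : Claim_equal_countLessEqual := by
  intro arr x _hdom hpre
  unfold Spec_countLessEqual countLessEqual countLessEqual_alt
  have hpiv : findPivotA arr 0 = (fp arr 0 : Int) := by
    simpa using findPivotA_eq arr 0
  have hcast : (fp arr 0 : Int) + 1 = ((fp arr 0 + 1 : Nat) : Int) := by push_cast; ring
  have hs := halves_sorted arr hpre
  simp only [hpiv, hcast, PySem.List.slice_to_natCast, PySem.List.slice_from_natCast,
    bisect_count _ _ hs.1, bisect_count _ _ hs.2, foldl_count]
  have := List.countP_append (l₁ := arr.take (fp arr 0 + 1)) (l₂ := arr.drop (fp arr 0 + 1))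
    (p := fun v => decide (v ≤ x))
  rw [List.take_append_drop] at this
  omega
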